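-- pv_equiv track=rewrite | github.com/pypi-data/pypi-mirror-254 | packages/bitscalcpro/bitscalcpro-3.0.tar.gz/bitscalcpro-3.0/bitscalcpro/base_converter.py | reverse_order_hex
-- ===== SOURCE A (Python) =====
-- def reverse_order_hex(hex_string):
--     """
--     Reverse the order of the hexadecimal string.
--
--     Parameters:
--     - hex_string (str): Input hexadecimal string.
--
--     Returns:
--     Tuple of reversed 16-bit, 32-bit, 64-bit.
--     """
--     def reverse_and_chunk(input_string, chunk_size):
--         if len(input_string) % chunk_size == 0:
--             reversed_chunks = [input_string[i:i + chunk_size] for i in range(0, len(input_string), chunk_size)]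
--             reversed_chunks = ''.join(reversed(reversed_chunks))
--             return ''.join(reversed([reversed_chunks[i:i + 2] for i in range(0, len(reversed_chunks), 2)]))
--         else:
--             return None
--
--     rev_16bit = reverse_and_chunk(hex_string, 4)
--     rev_32bit = reverse_and_chunk(hex_string, 8)
--     rev_64bit = reverse_and_chunk(hex_string, 16)
--
--     return rev_16bit, rev_32bit, rev_64bit
-- ===== SOURCE B (Python) =====
-- def reverse_order_hex(hex_string):
--     """
--     Reverse the order of the hexadecimal string.
--
--     One pass over the chunks in their original order; inside each chunk the
--     2-char bytes are emitted back-to-front by a recursive pair splitter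
--     (equivalent to reversing the chunk order globally and then reversing all
--     byte pairs of the rejoined string).
--
--     Returns:
--     Tuple of reversed 16-bit, 32-bit, 64-bit.
--     """
--     def rev_pairs(chunk):
--         if not chunk:
--             return ''
--         return rev_pairs(chunk[2:]) + chunk[:2]
--
--     def rac(s, size):
--         if len(s) % size:
--             return None
--         return ''.join(rev_pairs(s[i:i + size]) for i in range(0, len(s), size))
--
--     return (rac(hex_string, 4), rac(hex_string, 8), rac(hex_string, 16))
-- ===== Notes on version B (the rewrite author's own statement) =====
-- stated objective: simpler
-- what changed: A reverses the whole chunk list, joins it, re-splits the joined string into 2-char bytes and reverses that global byte list; B makes one pass over the chunks in their original order and a recursive pair-splitter emits each chunk's bytes back-to-front, with no global reversal and no re-splitting.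
import Mathlib
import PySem

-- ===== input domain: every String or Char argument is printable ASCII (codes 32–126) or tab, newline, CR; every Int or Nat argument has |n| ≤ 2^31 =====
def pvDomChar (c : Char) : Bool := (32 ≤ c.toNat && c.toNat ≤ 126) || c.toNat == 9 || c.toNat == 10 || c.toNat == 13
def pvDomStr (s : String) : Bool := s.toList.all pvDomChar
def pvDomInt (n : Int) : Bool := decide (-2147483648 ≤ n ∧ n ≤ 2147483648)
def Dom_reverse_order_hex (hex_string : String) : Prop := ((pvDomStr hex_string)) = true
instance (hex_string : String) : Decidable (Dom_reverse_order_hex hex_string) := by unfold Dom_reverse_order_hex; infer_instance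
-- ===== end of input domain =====

-- B makes one pass over the chunks in their original order and a recursive pair
-- splitter emits each chunk's 2-char bytes back-to-front, instead of A's global
-- chunk-list reversal followed by re-splitting and a global byte-pair reversal
-- (objective: simpler).


-- ===== PORT A =====
-- A's helper reverse_and_chunk: split into K-char chunks, reverse the chunk list,
-- join, re-split the joined string into 2-char pieces, reverse those, join.
def racA (s : List Char) (K : Int) : Option (List Char) :=
  if PySem.Int.mod (s.length : Int) K = 0 then
    let chunks := (PySem.List.pyRange 0 (s.length : Int) K).map
      (fun i => PySem.List.slice s (some i) (some (i + K)))
    let joined := PySem.Chars.join [] chunks.reverse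
    some (PySem.Chars.join []
      ((PySem.List.pyRange 0 (joined.length : Int) 2).map
        (fun i => PySem.List.slice joined (some i) (some (i + 2)))).reverse)
  else none

def reverse_order_hex (hex_string : String) : Option String × Option String × Option String :=
  ((racA hex_string.toList 4).map String.ofList,
   (racA hex_string.toList 8).map String.ofList,
   (racA hex_string.toList 16).map String.ofList)

-- ===== PORT B =====
-- B's helper rev_pairs: recursion on the chunk, emitting the tail's bytes first,
-- then the leading 2-char byte (chunk[2:] = rest.drop 1, chunk[:2] = take 2 —
-- exact, both slice bounds are nonnegative).
def revPairs : List Char → List Char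
  | [] => []
  | a :: rest => revPairs (rest.drop 1) ++ (a :: rest).take 2
termination_by c => c.length
decreasing_by simp

-- B's helper rac: early None on a bad length, else one pass over the chunks in
-- original order, each chunk's bytes reversed locally by rev_pairs.
def racB (s : List Char) (K : Int) : Option (List Char) :=
  if PySem.Int.mod (s.length : Int) K ≠ 0 then none
  else
    some (PySem.Chars.join []
      ((PySem.List.pyRange 0 (s.length : Int) K).map
        (fun i => revPairs (PySem.List.slice s (some i) (some (i + K))))))

def reverse_order_hex_alt (hex_string : String) : Option String × Option String × Option String :=
  ((racB hex_string.toList 4).map String.ofList,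
   (racB hex_string.toList 8).map String.ofList,
   (racB hex_string.toList 16).map String.ofList)

-- ===== PRECONDITION & SPEC =====
def Spec_reverse_order_hex (hex_string : String) (out : Option String × Option String × Option String) : Prop := out = reverse_order_hex_alt hex_string
instance (hex_string : String) (out : Option String × Option String × Option String) : Decidable (Spec_reverse_order_hex hex_string out) := by unfold Spec_reverse_order_hex; infer_instance

-- ===== CLAIM (what is proved, stated in full; the proofs are below) =====
def Claim_equal_reverse_order_hex : Prop := ∀ (hex_string : String), Dom_reverse_order_hex hex_string → Spec_reverse_order_hex hex_string (reverse_order_hex hex_string)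

-- ===== LEMMAS AND PROOFS =====

-- structural chunking: s cut into consecutive pieces of K chars (last may be short)
def sChunks (K : Nat) : List Char → List (List Char)
  | [] => []
  | c :: cs => ((c :: cs).take K) :: sChunks K (cs.drop (K - 1))
termination_by s => s.length
decreasing_by simp

theorem pyRange_pos_cons (a b K : Int) (hK : 0 < K) (hab : a < b) :
    PySem.List.pyRange a b K = a :: PySem.List.pyRange (a + K) b K := by
  rw [PySem.List.pyRange_of_pos _ _ hK, PySem.List.pyRange_of_pos _ _ hK]
  rw [if_pos hab]
  by_cases h2 : a + K < b
  · rw [if_pos h2]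
    have hq : (b - a + K - 1) / K = (b - (a + K) + K - 1) / K + 1 := by
      have h : b - a + K - 1 = (b - (a + K) + K - 1) + 1 * K := by ring
      rw [h, Int.add_mul_ediv_right _ _ (by omega : K ≠ 0)]
    have hnn : 0 ≤ (b - (a + K) + K - 1) / K := Int.ediv_nonneg (by omega) (by omega)
    have ht : ((b - a + K - 1) / K).toNat = ((b - (a + K) + K - 1) / K).toNat + 1 := by omega
    rw [ht, List.range_succ_eq_map, List.map_cons, List.map_map]
    refine congrArg₂ _ (by ring) ?_
    apply List.map_congr_left; intro x _
    simp [Function.comp]; ring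
  · rw [if_neg h2]
    have hle : 1 ≤ (b - a + K - 1) / K := by
      rw [Int.le_ediv_iff_mul_le hK]; omega
    have hlt : (b - a + K - 1) / K < 2 := by
      rw [Int.ediv_lt_iff_lt_mul hK]; omega
    have ht : ((b - a + K - 1) / K).toNat = 1 := by omega
    rw [ht]; simp

theorem pyRange_pos_shift (a b c K : Int) (hK : 0 < K) :
    PySem.List.pyRange (a + c) (b + c) K = (PySem.List.pyRange a b K).map (· + c) := by
  rw [PySem.List.pyRange_of_pos _ _ hK, PySem.List.pyRange_of_pos _ _ hK, List.map_map]
  have h2 : (a + c < b + c) ↔ (a < b) := by omega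
  have h3 : b + c - (a + c) = b - a := by ring
  simp only [h3, h2]
  apply List.map_congr_left; intro x _; simp [Function.comp]; ring

-- the slice comprehension over range(0, len(s), K) IS structural chunking
theorem chunks_eq (K : Nat) (hK : 0 < K) (s : List Char) :
    (PySem.List.pyRange 0 (s.length : Int) (K : Int)).map
      (fun i => PySem.List.slice s (some i) (some (i + (K : Int)))) = sChunks K s := by
  induction s using sChunks.induct K with
  | case1 =>
    rw [PySem.List.pyRange_of_pos _ _ (by exact_mod_cast hK)]
    simp [sChunks]
  | case2 c cs ih =>
    set s := c :: cs with hs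
    have hKI : (0:Int) < (K:Int) := by exact_mod_cast hK
    have hlen : (0:Int) < (s.length : Int) := by simp [hs]
    rw [pyRange_pos_cons _ _ _ hKI hlen, List.map_cons]
    have hdrop : cs.drop (K - 1) = s.drop K := by
      cases K with
      | zero => omega
      | succ k => simp [hs]
    rw [sChunks]
    by_cases hle : K ≤ s.length
    · have hhead : PySem.List.slice s (some 0) (some (0 + (K:Int))) = List.take K s := by
        rw [zero_add, PySem.List.slice_zero_start, PySem.List.slice_to_natCast]
      rw [hhead, hdrop]
      refine congrArg₂ _ rfl ?_
      have hcast : (s.length : Int) = ((s.length - K : Nat) : Int) + (K:Int) := by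
        push_cast [hle]; ring
      rw [zero_add, hcast]
      have hsh := pyRange_pos_shift 0 ((s.length - K : Nat) : Int) (K:Int) (K:Int) hKI
      rw [zero_add] at hsh
      rw [hsh, List.map_map]
      rw [hdrop] at ih
      have hlen2 : ((s.drop K).length : Int) = ((s.length - K : Nat) : Int) := by simp
      rw [hlen2] at ih
      rw [← ih]
      apply List.map_congr_left
      intro i hi
      have h0i : 0 ≤ i := ((PySem.List.mem_pyRange_iff_of_pos hKI i).mp hi).1
      simp only [Function.comp_apply]
      rw [PySem.List.slice_toNat _ (by omega) (by omega),
          PySem.List.slice_toNat _ (by omega) (by omega), List.drop_drop]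
      have e1 : (i + (K:Int)).toNat = i.toNat + K := by omega
      rw [e1]
      have e2 : (i + (K:Int) + (K:Int)).toNat - (i.toNat + K) = K := by omega
      have e3 : i.toNat + K - i.toNat = K := by omega
      rw [e2, e3, Nat.add_comm]
    · rw [Nat.not_le] at hle
      have hhead : PySem.List.slice s (some 0) (some (0 + (K:Int))) = List.take K s := by
        rw [zero_add, PySem.List.slice_zero_start, PySem.List.slice_to_natCast]
      have hnil : PySem.List.pyRange (0 + (K:Int)) (s.length : Int) (K:Int) = [] := by
        rw [PySem.List.pyRange_of_pos _ _ hKI, if_neg (by omega)]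
        simp
      have hnil2 : cs.drop (K - 1) = [] := by
        rw [hdrop]; apply List.drop_eq_nil_of_le; omega
      rw [hhead, hnil, hnil2]
      simp [sChunks]
      rfl

theorem sChunks_length_mem (K : Nat) (hK : 0 < K) (s : List Char)
    (hd : K ∣ s.length) : ∀ c ∈ sChunks K s, c.length = K := by
  induction s using sChunks.induct K with
  | case1 => intro c hc; simp [sChunks] at hc
  | case2 c cs ih =>
    have hdrop : cs.drop (K - 1) = (c :: cs).drop K := by
      cases K with
      | zero => omega
      | succ k => simp
    have hle : K ≤ (c :: cs).length := by
      rcases hd with ⟨m, hm⟩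
      rcases Nat.eq_zero_or_pos m with h0 | h0
      · simp [h0] at hm
      · calc K = K * 1 := by ring
          _ ≤ K * m := Nat.mul_le_mul_left _ h0
          _ = (c :: cs).length := hm.symm
    intro d hd'
    rw [sChunks] at hd'
    rcases List.mem_cons.mp hd' with h | h
    · subst h; rw [List.length_take]; omega
    · apply ih _ _ h
      rw [hdrop, List.length_drop]
      rcases hd with ⟨m, hm⟩
      exact ⟨m - 1, by rw [hm, Nat.mul_sub, Nat.mul_one]⟩

theorem sChunks_append (K : Nat) (hK : 0 < K) (a b : List Char) (hd : K ∣ a.length) :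
    sChunks K (a ++ b) = sChunks K a ++ sChunks K b := by
  induction a using sChunks.induct K with
  | case1 => simp [sChunks]
  | case2 c cs ih =>
    have hdrop : cs.drop (K - 1) = (c :: cs).drop K := by
      cases K with
      | zero => omega
      | succ k => simp
    have hle : K ≤ (c :: cs).length := by
      rcases hd with ⟨m, hm⟩
      rcases Nat.eq_zero_or_pos m with h0 | h0
      · simp [h0] at hm
      · calc K = K * 1 := by ring
          _ ≤ K * m := Nat.mul_le_mul_left _ h0
          _ = (c :: cs).length := hm.symm
    have hd2 : K ∣ ((c :: cs).drop K).length := by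
      rw [List.length_drop]
      rcases hd with ⟨m, hm⟩
      exact ⟨m - 1, by rw [hm, Nat.mul_sub, Nat.mul_one]⟩
    cases b with
    | nil => simp [sChunks]
    | cons b0 bs =>
      rw [show (c :: cs) ++ (b0 :: bs) = c :: (cs ++ b0 :: bs) by simp, sChunks, sChunks]
      rw [List.cons_append]
      congr 1
      · rw [← List.cons_append, List.take_append_of_le_length hle]
      · have hdd : (cs ++ b0 :: bs).drop (K - 1) = cs.drop (K - 1) ++ b0 :: bs := by
          apply List.drop_append_of_le_length
          simp at hle ⊢; omega
        rw [hdd]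
        rw [hdrop] at *
        exact ih hd2

theorem sChunks_flatten (K : Nat) (hK : 0 < K) (cs : List (List Char))
    (hd : ∀ c ∈ cs, K ∣ c.length) :
    sChunks K cs.flatten = cs.flatMap (sChunks K) := by
  induction cs with
  | nil => simp [sChunks]
  | cons c cs ih =>
    rw [List.flatten_cons, sChunks_append K hK _ _ (hd c (by simp)), List.flatMap_cons]
    rw [ih (fun d hdm => hd d (by simp [hdm]))]

theorem join_nil_eq_flatten (l : List (List Char)) : PySem.Chars.join [] l = l.flatten := by
  induction l with
  | nil => simp [PySem.Chars.join_nil]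
  | cons c cs ih =>
    cases cs with
    | nil => simp [PySem.Chars.join_singleton]
    | cons d ds => simp [PySem.Chars.join_cons_cons] at *; simp [ih]

theorem flatten_map_flatten (cs : List (List Char)) (g : List Char → List (List Char)) :
    (cs.flatMap g).flatten = (cs.map (fun c => (g c).flatten)).flatten := by
  induction cs with
  | nil => rfl
  | cons c cs ih => simp [ih]

-- rev_pairs is exactly: chunk the list into 2-char bytes, reverse, flatten
theorem revPairs_eq (c : List Char) : revPairs c = (sChunks 2 c).reverse.flatten := by
  induction c using sChunks.induct 2 with
  | case1 => rw [revPairs.eq_def]; simp [sChunks]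
  | case2 a rest ih =>
    rw [revPairs.eq_def, sChunks]
    simp only [show (2:Nat) - 1 = 1 from rfl] at *
    rw [ih]
    simp

theorem rac_eq (K : Nat) (hK : 0 < K) (h2 : 2 ∣ K) (s : List Char) :
    racA s (K : Int) = racB s (K : Int) := by
  have hc2 : ∀ t : List Char,
      (PySem.List.pyRange 0 (t.length : Int) 2).map
        (fun i => PySem.List.slice t (some i) (some (i + 2))) = sChunks 2 t := by
    intro t
    have h := chunks_eq 2 (by norm_num) t
    simpa using h
  unfold racA racB
  by_cases hmod : PySem.Int.mod (s.length : Int) (K : Int) = 0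
  · rw [if_pos hmod, if_neg (by simpa using hmod)]
    have hdvd : K ∣ s.length := by
      have := (PySem.Int.mod_eq_zero_iff_dvd _ _).mp hmod
      exact_mod_cast this
    have hB : (PySem.List.pyRange 0 (s.length : Int) (K:Int)).map
        (fun i => revPairs (PySem.List.slice s (some i) (some (i + (K:Int))))) =
        (sChunks K s).map (fun c => (sChunks 2 c).reverse.flatten) := by
      have : (PySem.List.pyRange 0 (s.length : Int) (K:Int)).map
          (fun i => revPairs (PySem.List.slice s (some i) (some (i + (K:Int))))) =
          ((PySem.List.pyRange 0 (s.length : Int) (K:Int)).map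
            (fun i => PySem.List.slice s (some i) (some (i + (K:Int))))).map revPairs := by
        rw [List.map_map]; rfl
      rw [this, chunks_eq K hK s]
      apply List.map_congr_left
      intro c _
      exact revPairs_eq c
    simp only [chunks_eq K hK s, hc2, join_nil_eq_flatten, hB]
    congr 1
    rw [sChunks_flatten 2 (by norm_num) _
      (fun c hc => by
        have := sChunks_length_mem K hK s hdvd c (List.mem_reverse.mp hc)
        omega)]
    rw [List.reverse_flatMap, List.reverse_reverse]
    rw [flatten_map_flatten]
    simp [Function.comp]
  · rw [if_neg hmod, if_pos (by simpa using hmod)]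

-- ===== VERDICT (by name: the statement is the Claim_ definition above) =====
theorem reverse_order_hex_spec : Claim_equal_reverse_order_hex := by
  intro s _
  unfold Spec_reverse_order_hex reverse_order_hex reverse_order_hex_alt
  have h4 := rac_eq 4 (by norm_num) (by norm_num) s.toList
  have h8 := rac_eq 8 (by norm_num) (by norm_num) s.toList
  have h16 := rac_eq 16 (by norm_num) (by norm_num) s.toList
  norm_num at h4 h8 h16
  rw [h4, h8, h16]
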